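-- pv_equiv track=rewrite | github.com/prgu6170/distributed-file-transfer | dfc.py | get_req_servers
-- ===== SOURCE A (Python) =====
-- def decision_list():
--     # Returns a list of dictionaries of lists that tells which part of file should be uploaded to which servers
--     # For example, if md5 value is 2, then 0 (1st) part of file is uploaded to 1 (2nd) and 2 (3rd) server
--     lst = [{} for i in range(4)]
--     lst[0][0] = [3, 0]; lst[0][1] = [0, 1]; lst[0][2] = [1, 2]; lst[0][3] = [2, 3]
--     lst[1][0] = [0, 1]; lst[1][1] = [1, 2]; lst[1][2] = [2, 3]; lst[1][3] = [3, 0]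
--     lst[2][0] = [1, 2]; lst[2][1] = [2, 3]; lst[2][2] = [3, 0]; lst[2][3] = [0, 1]
--     lst[3][0] = [2, 3]; lst[3][1] = [3, 0]; lst[3][2] = [0, 1]; lst[3][3] = [1, 2]
--     return lst
--
-- def get_req_servers(active_serv, value):
--     # Based on md5 value returns a dictionary which gives which part should be obtained from which active server.
--     # helps in traffic optimization
--     dec_list = decision_list()
--     req_dict = dec_list[value]
--     final_dict = {}
--     for part_num in range(4):
--         for serv_num in req_dict[part_num]:
--             if serv_num in active_serv:
--                 final_dict[part_num+1] = serv_num
--                 break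
--     return final_dict
-- ===== SOURCE B (Python) =====
-- def get_req_servers(active_serv, value):
--     # Server-centric inversion of A's part-centric scan: each active server s
--     # is the backup (second) choice of part (s - value) % 4 and the preferred
--     # (first) choice of part (s + 1 - value) % 4; write backups first, then let
--     # preferred choices overwrite, and emit the assignments in part order.
--     best = [None] * 4
--     for s in range(4):
--         if s in active_serv:
--             best[(s - value) % 4] = s
--     for s in range(4):
--         if s in active_serv:
--             best[(s + 1 - value) % 4] = s
--     return {p + 1: best[p] for p in range(4) if best[p] is not None}
-- ===== Notes on version B (the rewrite author's own statement) =====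
-- stated objective: alternative
-- what changed: B inverts the loop: instead of scanning each part's two table-drawn candidates with a break, it iterates over the four servers, writing each active server into its backup part slot and then into its preferred part slot (overwriting), and finally emits the slots in part order; the 4x4 decision table disappears.
import Mathlib
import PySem

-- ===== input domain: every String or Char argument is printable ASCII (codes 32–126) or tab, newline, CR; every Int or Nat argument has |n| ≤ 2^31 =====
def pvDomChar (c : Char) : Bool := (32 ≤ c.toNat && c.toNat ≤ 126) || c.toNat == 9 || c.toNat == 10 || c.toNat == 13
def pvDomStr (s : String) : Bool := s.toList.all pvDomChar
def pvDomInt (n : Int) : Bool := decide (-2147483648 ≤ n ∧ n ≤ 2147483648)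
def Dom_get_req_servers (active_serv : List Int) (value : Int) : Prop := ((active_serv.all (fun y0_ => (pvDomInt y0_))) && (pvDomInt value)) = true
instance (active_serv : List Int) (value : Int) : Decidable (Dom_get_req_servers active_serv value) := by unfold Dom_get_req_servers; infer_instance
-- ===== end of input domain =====

-- B drops A's 4×4 decision table and part-wise candidate scan; it instead iterates over the
-- four servers, writing each active one into its backup part slot then its preferred part slot
-- (overwrite = priority), and emits the slots in part order (alternative, same cost).

-- ===== PORT A =====
-- the fixed table: list of four dicts, each built by the four assignments in order
def decision_list : List (PySem.Dict Int (List Int)) :=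
  let d0 := (((((PySem.Dict.empty : PySem.Dict Int (List Int)).insert 0 [3,0]).insert 1 [0,1]).insert 2 [1,2]).insert 3 [2,3])
  let d1 := (((((PySem.Dict.empty : PySem.Dict Int (List Int)).insert 0 [0,1]).insert 1 [1,2]).insert 2 [2,3]).insert 3 [3,0])
  let d2 := (((((PySem.Dict.empty : PySem.Dict Int (List Int)).insert 0 [1,2]).insert 1 [2,3]).insert 2 [3,0]).insert 3 [0,1])
  let d3 := (((((PySem.Dict.empty : PySem.Dict Int (List Int)).insert 0 [2,3]).insert 1 [3,0]).insert 2 [0,1]).insert 3 [1,2])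
  [d0, d1, d2, d3]

-- dec_list[value] raises IndexError for value outside -4..3 (excluded by Pre_; none ↦ []).
-- req_dict[part_num] always finds its key (0..3 all present), so getD [] is unreachable.
-- the inner for-with-break = first element of req_dict[part_num] lying in active_serv
def get_req_servers (active_serv : List Int) (value : Int) : List (Int × Int) :=
  let dec_list := decision_list
  match PySem.List.pyGet? dec_list value with
  | none => []
  | some req_dict =>
    ((List.range 4).foldl (fun final_dict part_num =>
      match ((req_dict.getD (Int.ofNat part_num) []).find? (fun s => active_serv.contains s)) with
      | some s => PySem.Dict.insert final_dict (Int.ofNat part_num + 1) s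
      | none => final_dict) (PySem.Dict.empty : PySem.Dict Int Int)).items

-- ===== PORT B =====
-- best[(s - value) % 4] := s for each active s, then best[(s + 1 - value) % 4] := s (overwrite),
-- then emit {p+1: best[p]} for the filled slots in part order
def get_req_servers_alt (active_serv : List Int) (value : Int) : List (Int × Int) :=
  let best0 : List (Option Int) := [none, none, none, none]
  let best1 := (List.range 4).foldl (fun b s =>
    if active_serv.contains (Int.ofNat s) then
      b.set ((PySem.Int.mod (Int.ofNat s - value) 4)).toNat (some (Int.ofNat s))
    else b) best0
  let best2 := (List.range 4).foldl (fun b s =>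
    if active_serv.contains (Int.ofNat s) then
      b.set ((PySem.Int.mod (Int.ofNat s + 1 - value) 4)).toNat (some (Int.ofNat s))
    else b) best1
  (List.range 4).filterMap (fun p =>
    (best2.getD p none).map (fun s => (Int.ofNat p + 1, s)))

-- ===== PRECONDITION & SPEC =====
-- A raises IndexError on dec_list[value] when value is outside -4..3; exactly those inputs are excluded.
def Pre_get_req_servers (_active_serv : List Int) (value : Int) : Prop := -4 ≤ value ∧ value ≤ 3
instance (active_serv : List Int) (value : Int) : Decidable (Pre_get_req_servers active_serv value) := by unfold Pre_get_req_servers; infer_instance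
def pvWitness_get_req_servers : List Int × Int := ([0, 2], 1)

def Spec_get_req_servers (active_serv : List Int) (value : Int) (out : List (Int × Int)) : Prop := out = get_req_servers_alt active_serv value
instance (active_serv : List Int) (value : Int) (out : List (Int × Int)) : Decidable (Spec_get_req_servers active_serv value out) := by unfold Spec_get_req_servers; infer_instance

-- ===== CLAIM (what is proved, stated in full; the proofs are below) =====
def Claim_equal_get_req_servers : Prop := ∀ (active_serv : List Int) (value : Int), Dom_get_req_servers active_serv value → Pre_get_req_servers active_serv value → Spec_get_req_servers active_serv value (get_req_servers active_serv value)
-- ===== LEMMAS AND PROOFS =====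
set_option maxHeartbeats 4000000 in
theorem get_req_servers_case (active_serv : List Int) (value : Int)
    (h1 : -4 ≤ value) (h2 : value ≤ 3) :
    get_req_servers active_serv value = get_req_servers_alt active_serv value := by
  interval_cases value <;>
    by_cases hc0 : (0:Int) ∈ active_serv <;>
    by_cases hc1 : (1:Int) ∈ active_serv <;>
    by_cases hc2 : (2:Int) ∈ active_serv <;>
    by_cases hc3 : (3:Int) ∈ active_serv <;>
    simp [get_req_servers, get_req_servers_alt, decision_list,
      PySem.List.pyGet?, PySem.List.pyIdx?, PySem.Dict.getD, PySem.Dict.get?,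
      PySem.Dict.empty, PySem.Dict.insert, PySem.Int.mod,
      List.range_succ, List.foldl, hc0, hc1, hc2, hc3]

-- ===== VERDICT (by name: the statement is the Claim_ definition above) =====
theorem get_req_servers_spec : Claim_equal_get_req_servers := by
  intro active_serv value _ hpre
  exact get_req_servers_case active_serv value hpre.1 hpre.2
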